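-- pv_equiv track=rewrite | github.com/ten-jampa/MIT-6.101-programming | sat/lab.py | get_all_group
-- ===== SOURCE A (Python) =====
-- def get_all_group(room, capacity, students):
--     """Given a room, its capacity, and the list of
--     students, the function returns a set of all (capacity+1) length
--     tuples possibles with the given list of students."""
--     out = set()
--
--     # Base case
--     if capacity == 0:
--         return [(student + "_" + room,) for student in students]
--
--     # Recursive case
--     else:
--         capacity -= 1
--         for i, student1 in enumerate(students):
--             copied_students = students[i + 1 :]
--             for rest_students in get_all_group(room, capacity, copied_students):
--                 combo = tuple(sorted((student1 + "_" + room,) + rest_students))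
--                 out.add(combo)
--     return list(out)
-- ===== SOURCE B (Python) =====
-- def get_all_group(room, capacity, students):
--     """All (capacity+1)-sized groups from students, tagged with the room,
--     built by a one-pass Pascal-triangle DP over the students instead of
--     recursion over suffixes."""
--     if capacity == 0:
--         return [(student + "_" + room,) for student in students]
--     if capacity < 0:
--         return []
--     k = capacity + 1
--     if k > len(students):
--         return []
--     # rows[j] = list of all j-element combinations of the students processed so far
--     rows = [[()]] + [[] for _ in range(k)]
--     for s in reversed(students):
--         rows = [[()]] + [[(s,) + c for c in prev] + cur
--                          for prev, cur in zip(rows, rows[1:])]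
--     out = set()
--     for combo in rows[-1]:
--         out.add(tuple(sorted(x + "_" + room for x in combo)))
--     return list(out)
-- ===== Notes on version B (the rewrite author's own statement) =====
-- stated objective: alternative
-- what changed: Replaces A's recursion over suffixes (which rebuilds, re-sorts and re-deduplicates intermediate tuple sets at every recursion level) by a single Pascal-triangle DP pass that builds every j-element combination exactly once and tags/sorts/dedups only the final groups. Pre_ excludes inputs whose output is a list(set(...)) of two or more groups: there A's list order is only Python's accidental set-iteration (hash) order, which no independent implementation can reproduce - A and B return exactly the same set of groups everywhere.
import Mathlib
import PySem

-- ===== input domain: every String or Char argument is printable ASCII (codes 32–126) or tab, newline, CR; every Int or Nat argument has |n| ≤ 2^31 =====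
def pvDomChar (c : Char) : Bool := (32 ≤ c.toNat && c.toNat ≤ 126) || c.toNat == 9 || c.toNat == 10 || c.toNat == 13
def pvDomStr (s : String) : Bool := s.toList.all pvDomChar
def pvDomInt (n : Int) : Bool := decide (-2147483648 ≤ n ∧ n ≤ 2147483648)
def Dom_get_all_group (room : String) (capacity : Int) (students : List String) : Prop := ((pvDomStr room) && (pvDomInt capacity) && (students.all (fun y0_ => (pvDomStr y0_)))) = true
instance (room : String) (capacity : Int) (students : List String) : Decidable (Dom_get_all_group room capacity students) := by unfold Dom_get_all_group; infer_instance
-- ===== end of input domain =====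

-- B replaces A's recursion over suffixes (with a set rebuilt and tuples re-sorted at every
-- level) by a single Pascal-triangle DP pass building every j-combination once; each group
-- is tagged, sorted and deduplicated only once at the end.  Both Pythons return
-- list(set(...)); the ports fix the set's insertion order (PySem.Set) and agree exactly.

-- ===== PORT A =====
mutual
  -- the 'for i, student1 in enumerate(students): copied_students = students[i+1:] …' loop:
  -- the pairs (student1, students[i+1:]) are exactly the successive (head, tail) splits
  def get_all_group_aLoop (room : String) (c : Int) (students : List String)
      (out : PySem.Set (List String)) : PySem.Set (List String) :=
    match students with
    | [] => out
    | s1 :: rest =>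
        get_all_group_aLoop room c rest
          ((get_all_group room c rest).foldl
            (fun o r => PySem.Set.add o (PySem.List.sorted ((s1 ++ "_" ++ room) :: r) (fun x => x) false)) out)
  termination_by (students.length, 0)

  def get_all_group (room : String) (capacity : Int) (students : List String) : List (List String) :=
    if capacity = 0 then
      students.map (fun student => [student ++ "_" ++ room])
    else
      get_all_group_aLoop room (capacity - 1) students PySem.Set.empty
  termination_by (students.length, 1)
end

-- ===== PORT B =====
def get_all_group_alt (room : String) (capacity : Int) (students : List String) : List (List String) :=
  if capacity = 0 then
    students.map (fun student => [student ++ "_" ++ room])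
  else if capacity < 0 then
    []
  else
    let k := (capacity + 1).toNat
    if (capacity + 1) > (students.length : Int) then [] else
    -- rows[j] = all j-element combinations of the students processed so far
    let rows0 : List (List (List String)) := [[]] :: List.replicate k []
    let rows := students.reverse.foldl
      (fun rows s =>
        [[]] :: (rows.zip rows.tail).map (fun pc => pc.1.map (s :: ·) ++ pc.2))
      rows0
    -- rows[-1]; rows is never empty (its length is k+1 throughout), so the getD is never used
    let last := (PySem.List.pyGet? rows (-1)).getD []
    last.foldl
      (fun o combo => PySem.Set.add o (PySem.List.sorted (combo.map (· ++ "_" ++ room)) (fun x => x) false))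
      PySem.Set.empty

-- ===== PRECONDITION & SPEC =====
-- Pre_ excludes the inputs whose output is a list(set(...)) of two or more groups: there
-- A's list order is only Python's accidental set-iteration (hash) order, which no
-- independent implementation can reproduce; A and B return the same set of groups
-- everywhere, and on every admitted input (at most one group, or the deterministic
-- capacity==0 list) the returned lists agree outright.  The bound C(n, capacity+1) <= 1
-- is closed-form on the input (no simulation).
def Pre_get_all_group (room : String) (capacity : Int) (students : List String) : Prop :=
  capacity ≤ 0 ∨ (students.length : Int) < capacity + 1 ∨
    Nat.choose students.length (capacity + 1).toNat ≤ 1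
instance (room : String) (capacity : Int) (students : List String) : Decidable (Pre_get_all_group room capacity students) := by unfold Pre_get_all_group; infer_instance

def pvWitness_get_all_group : String × Int × List String := ("r", 2, ["a", "b", "c"])

def Spec_get_all_group (room : String) (capacity : Int) (students : List String) (out : List (List String)) : Prop := out = get_all_group_alt room capacity students
instance (room : String) (capacity : Int) (students : List String) (out : List (List String)) : Decidable (Spec_get_all_group room capacity students out) := by unfold Spec_get_all_group; infer_instance

-- ===== CLAIM (what is proved, stated in full; the proofs are below) =====
def Claim_equal_get_all_group : Prop := ∀ (room : String) (capacity : Int) (students : List String), Dom_get_all_group room capacity students → Pre_get_all_group room capacity students → Spec_get_all_group room capacity students (get_all_group room capacity students)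

-- ===== LEMMAS AND PROOFS =====

-- lexicographic j-element combinations of a list (proof-side common description)
def pvComb : Nat → List String → List (List String)
  | 0, _ => [[]]
  | _ + 1, [] => []
  | k + 1, x :: xs => (pvComb k xs).map (x :: ·) ++ pvComb (k + 1) xs

def pvTag (room : String) (combo : List String) : List String :=
  PySem.List.sorted (combo.map (· ++ "_" ++ room)) (fun x => x) false

lemma pvComb_nil_of_lt : ∀ (l : List String) (k : Nat), l.length < k → pvComb k l = [] := by
  intro l
  induction l with
  | nil => intro k hk; match k, hk with | k + 1, _ => rfl
  | cons x xs ih =>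
    intro k hk
    match k, hk with
    | k + 1, hk =>
      simp only [pvComb, List.append_eq_nil_iff]
      constructor
      · rw [ih k (by simp at hk; omega)]; rfl
      · exact ih (k + 1) (by simp at hk; omega)

lemma pvComb_one (l : List String) : pvComb 1 l = l.map (fun x => [x]) := by
  induction l with
  | nil => rfl
  | cons x xs ih => simp [pvComb, ih]

lemma pvComb_full : ∀ l : List String, pvComb l.length l = [l] := by
  intro l
  induction l with
  | nil => rfl
  | cons x xs ih =>
    simp only [List.length_cons, pvComb, ih, List.map_cons, List.map_nil,
      pvComb_nil_of_lt xs (xs.length + 1) (by omega), List.append_nil]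

lemma pvOfList_map_ofList {α β : Type} [BEq α] [LawfulBEq α] [BEq β] [LawfulBEq β]
    (f : α → β) (l : List α) :
    PySem.Set.ofList ((PySem.Set.ofList l).map f) = PySem.Set.ofList (l.map f) := by
  induction l using List.reverseRecOn with
  | nil => rfl
  | append_singleton l x ih =>
    by_cases hx : x ∈ l
    · have h1 : PySem.Set.ofList (l ++ [x]) = PySem.Set.ofList l := by
        rw [PySem.Set.ofList_append_singleton,
          PySem.Set.add_of_mem ((PySem.Set.mem_ofList l x).2 hx)]
      have h2 : f x ∈ PySem.Set.ofList (l.map f) :=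
        (PySem.Set.mem_ofList _ _).2 (List.mem_map_of_mem hx)
      rw [h1, ih, List.map_append, List.map_singleton,
        PySem.Set.ofList_append_singleton, PySem.Set.add_of_mem h2]
    · have h1 : PySem.Set.ofList (l ++ [x]) = PySem.Set.ofList l ++ [x] := by
        rw [PySem.Set.ofList_append_singleton,
          PySem.Set.add_of_not_mem (fun h => hx ((PySem.Set.mem_ofList l x).1 h))]
      rw [h1, List.map_append, List.map_singleton, PySem.Set.ofList_append_singleton, ih,
        List.map_append, List.map_singleton, PySem.Set.ofList_append_singleton]

lemma pvUpdate_map_ofList {α β : Type} [BEq α] [LawfulBEq α] [BEq β] [LawfulBEq β]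
    (f : α → β) (l : List α) (s : PySem.Set β) :
    s.update ((PySem.Set.ofList l).map f) = s.update (l.map f) := by
  rw [PySem.Set.update_eq_append_filter, PySem.Set.update_eq_append_filter,
    pvOfList_map_ofList]

lemma pvSortedCons (a : String) (l : List String) :
    PySem.List.sorted (a :: PySem.List.sorted l (fun x => x) false) (fun x => x) false
      = PySem.List.sorted (a :: l) (fun x => x) false := by
  refine PySem.List.sorted_eq_sorted_of_perm _ _ _ (fun x y h => h) ?_
  exact List.Perm.cons a (PySem.List.sorted_perm l (fun x => x) false)

-- the outer loop does nothing when the (already decremented) capacity is negative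
lemma pv_aLoop_neg (room : String) : ∀ (n : Nat) (students : List String),
    students.length = n → ∀ c : Int, c < 0 → ∀ out : PySem.Set (List String),
    get_all_group_aLoop room c students out = out := by
  intro n
  induction n using Nat.strong_induction_on with
  | _ n ih =>
    intro students hlen c hc out
    match students with
    | [] => simp [get_all_group_aLoop]
    | s1 :: rest =>
      have hr : rest.length < n := by simp at hlen; omega
      have hget : get_all_group room c rest = PySem.Set.empty := by
        rw [get_all_group]
        rw [if_neg (by omega)]
        exact ih rest.length hr rest rfl (c - 1) (by omega) _
      rw [get_all_group_aLoop, hget]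
      exact ih rest.length hr rest rfl c hc out

lemma pv_get_neg (room : String) (c : Int) (students : List String) (hc : c < 0) :
    get_all_group room c students = [] := by
  rw [get_all_group, if_neg (by omega)]
  exact pv_aLoop_neg room students.length students rfl (c - 1) (by omega) _

-- the outer loop inserts exactly the (sorted, tagged) lexicographic combinations
lemma pv_aLoop_char (room : String) : ∀ (n : Nat) (students : List String),
    students.length = n → ∀ c : Int, 0 ≤ c → ∀ out : PySem.Set (List String),
    get_all_group_aLoop room c students out
      = out.update ((pvComb (c.toNat + 2) students).map (pvTag room)) := by
  intro n
  induction n using Nat.strong_induction_on with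
  | _ n ih =>
    intro students hlen c hc out
    match students with
    | [] =>
      have : pvComb (c.toNat + 2) [] = [] := rfl
      simp [get_all_group_aLoop, this, PySem.Set.update_nil]
    | s1 :: rest =>
      have hr : rest.length < n := by simp at hlen; omega
      rw [get_all_group_aLoop]
      have hstep : (get_all_group room c rest).foldl
          (fun o r => PySem.Set.add o (PySem.List.sorted ((s1 ++ "_" ++ room) :: r) (fun x => x) false)) out
          = out.update (((pvComb (c.toNat + 1) rest).map (s1 :: ·)).map (pvTag room)) := by
        rcases eq_or_lt_of_le hc with hc0 | hc1
        · -- c = 0: the inner call is the base case, a plain list of tagged singletons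
          have hget : get_all_group room c rest = rest.map (fun s => [s ++ "_" ++ room]) := by
            rw [get_all_group, if_pos hc0.symm]
          rw [hget, ← PySem.Set.update_map_eq_foldl_add]
          congr 1
          rw [← hc0]
          simp only [Int.toNat_zero, Nat.zero_add, pvComb_one, List.map_map]
          rfl
        · -- c ≥ 1: the inner call is a deduplicated list; dedup does not change the set
          have hget : get_all_group room c rest
              = PySem.Set.ofList ((pvComb (c.toNat + 1) rest).map (pvTag room)) := by
            rw [get_all_group, if_neg (by omega), ih rest.length hr rest rfl (c - 1) (by omega) _]
            rw [PySem.Set.update_empty]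
            have h2 : (c - 1).toNat + 2 = c.toNat + 1 := by omega
            rw [h2]
          rw [hget, ← PySem.Set.update_map_eq_foldl_add, pvUpdate_map_ofList]
          congr 1
          simp only [List.map_map]
          refine List.map_congr_left (fun combo _ => ?_)
          simp only [Function.comp_apply, pvTag, List.map_cons]
          exact pvSortedCons (s1 ++ "_" ++ room) (combo.map (· ++ "_" ++ room))
      rw [hstep, ih rest.length hr rest rfl c hc _, ← PySem.Set.update_append, ← List.map_append]
      rfl

lemma pv_get_pos (room : String) (m : Int) (students : List String) (hm : 1 ≤ m) :
    get_all_group room m students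
      = PySem.Set.ofList ((pvComb (m.toNat + 1) students).map (pvTag room)) := by
  rw [get_all_group, if_neg (by omega),
    pv_aLoop_char room students.length students rfl (m - 1) (by omega) _,
    PySem.Set.update_empty]
  have h2 : (m - 1).toNat + 2 = m.toNat + 1 := by omega
  rw [h2]

-- B's DP rows after processing (from the right) the whole list are exactly the combination lists
lemma pv_rows_char (k : Nat) : ∀ l : List String,
    l.reverse.foldl
      (fun rows s => [[]] :: (rows.zip rows.tail).map
        (fun pc => pc.1.map (s :: ·) ++ pc.2))
      ([[]] :: List.replicate k ([] : List (List String)))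
      = (List.range (k + 1)).map (fun j => pvComb j l) := by
  intro l
  induction l with
  | nil =>
    simp only [List.reverse_nil, List.foldl_nil, List.range_succ_eq_map, List.map_cons,
      List.map_map]
    congr 1
    rw [eq_comm, List.eq_replicate_iff]
    refine ⟨by simp, ?_⟩
    intro b hb
    simp only [List.mem_map, List.mem_range] at hb
    obtain ⟨j, _, hj⟩ := hb
    simp only [Function.comp_apply, Nat.succ_eq_add_one] at hj
    exact hj ▸ rfl
  | cons x t ih =>
    rw [List.reverse_cons, List.foldl_append, ih, List.foldl_cons, List.foldl_nil]
    refine List.ext_getElem ?_ ?_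
    · simp
    · intro i hi hi2
      match i with
      | 0 => simp [pvComb]
      | j + 1 =>
        have hlen : ((List.range (k + 1)).map fun j => pvComb j t).length = k + 1 := by simp
        have hjk : j < k := by
          simp only [List.length_cons, List.length_map, List.length_zip, List.length_tail,
            hlen] at hi
          simp at hi
          omega
        simp only [List.getElem_cons_succ, List.getElem_map, List.getElem_zip,
          List.getElem_tail, List.getElem_range]
        rfl

-- ===== VERDICT (by name: the statement is the Claim_ definition above) =====
theorem get_all_group_spec : Claim_equal_get_all_group := by
  intro room capacity students _ hpre
  unfold Spec_get_all_group get_all_group_alt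
  rcases lt_trichotomy capacity 0 with hneg | h0 | hpos
  · rw [if_neg (by omega), if_pos hneg, pv_get_neg room capacity students hneg]
  · rw [get_all_group, if_pos h0, if_pos h0]
  · -- capacity ≥ 1: Pre_ leaves only "no group at all" or "exactly one full group"
    have hcase : (capacity + 1) > (students.length : Int) ∨
        (capacity + 1).toNat = students.length := by
      rcases hpre with hc | hlen | hch
      · omega
      · left; omega
      · by_cases hb : (capacity + 1) > (students.length : Int)
        · left; exact hb
        · right
          set k := (capacity + 1).toNat with hk
          have hk1 : 1 ≤ k := by omega
          have hkn : k ≤ students.length := by omega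
          by_contra hne
          have hklt : k < students.length := lt_of_le_of_ne hkn hne
          have h := Nat.choose_le_choose k (show k + 1 ≤ students.length from hklt)
          rw [Nat.choose_succ_self_right] at h
          omega
    rw [if_neg (by omega), if_neg (by omega)]
    rcases hcase with hbig | hfull
    · rw [if_pos hbig, pv_get_pos room capacity students (by omega),
        pvComb_nil_of_lt students (capacity.toNat + 1) (by omega)]
      rfl
    · rw [if_neg (by omega)]
      simp only []
      rw [pv_rows_char]
      have hlast : (PySem.List.pyGet? ((List.range ((capacity + 1).toNat + 1)).map
          (fun j => pvComb j students)) (-1)).getD []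
          = pvComb (capacity + 1).toNat students := by
        rw [PySem.List.pyGet?_neg_one, List.getLast?_eq_getElem?]
        simp
      rw [hlast, ← PySem.Set.update_map_eq_foldl_add, PySem.Set.update_empty,
        pv_get_pos room capacity students (by omega)]
      have h1 : capacity.toNat + 1 = (capacity + 1).toNat := by omega
      rw [h1, hfull, pvComb_full]
      rfl
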